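-- pv_equiv track=rewrite | github.com/jankwizard/ascii-scorewriter | scorewriter.py | tab_oct2str
-- ===== SOURCE A (Python) =====
-- def note2num(note):
--     l = [ 'c', 'c#', 'd', 'd#', 'e', 'f', 'f#', 'g', 'g#', 'a', 'a#', 'b' ]
--     try:
--         return l.index(note)
--     except:
--         return "" # ignore things like b# ...
--
-- def num2note(num):
--     l = [ 'c', 'c#', 'd', 'd#', 'e', 'f', 'f#', 'g', 'g#', 'a', 'a#', 'b' ]
--     return l[num]
--
-- def tab_oct2str(tab):
--     s = ''
--     notenums = []
--     for note in tab:
--         notenums.append(note2num(note))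
--     for i in range(0, 12):
--         if i in notenums:
--             s += ' ' + num2note(i).ljust(2) + ' |'
--         else:
--             s += '    |'
--     return s
-- ===== SOURCE B (Python) =====
-- def note2num(note):
--     l = [ 'c', 'c#', 'd', 'd#', 'e', 'f', 'f#', 'g', 'g#', 'a', 'a#', 'b' ]
--     try:
--         return l.index(note)
--     except:
--         return "" # ignore things like b# ...
--
-- def num2note(num):
--     l = [ 'c', 'c#', 'd', 'd#', 'e', 'f', 'f#', 'g', 'g#', 'a', 'a#', 'b' ]
--     return l[num]
--
-- def tab_oct2str(tab):
--     # scatter pass: write each recognised note into its fixed column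
--     cells = ['    |'] * 12
--     for note in tab:
--         num = note2num(note)
--         if num != '':
--             cells[num] = ' ' + num2note(num).ljust(2) + ' |'
--     return ''.join(cells)
-- ===== Notes on version B (the rewrite author's own statement) =====
-- stated objective: alternative
-- what changed: A gathers: for each of the 12 columns it scans the list of note numbers for membership; B scatters: it starts from 12 blank cells and writes each recognised note into its column by index in one pass over the input, then joins the cells.
import Mathlib
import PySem

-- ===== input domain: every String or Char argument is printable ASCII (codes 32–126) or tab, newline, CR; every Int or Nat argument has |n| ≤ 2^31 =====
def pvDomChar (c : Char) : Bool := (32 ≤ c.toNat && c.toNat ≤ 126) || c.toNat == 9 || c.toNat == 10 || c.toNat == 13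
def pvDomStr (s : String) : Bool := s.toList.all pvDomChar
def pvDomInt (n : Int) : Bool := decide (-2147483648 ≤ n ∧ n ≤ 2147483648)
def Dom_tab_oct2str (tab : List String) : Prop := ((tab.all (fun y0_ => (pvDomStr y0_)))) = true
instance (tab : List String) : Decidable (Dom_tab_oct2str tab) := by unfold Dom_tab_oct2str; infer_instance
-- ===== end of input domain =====

-- B replaces A's per-column membership scan (gather) by a single scatter pass writing
-- each recognised note into its fixed column; same output, alternative decomposition.

-- shared module helpers (same in Source A and Source B)
def noteNames : List String := ["c", "c#", "d", "d#", "e", "f", "f#", "g", "g#", "a", "a#", "b"]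

-- l.index(note) wrapped in try/except returning "": none plays the role of ""
def note2num (note : String) : Option Int :=
  (PySem.List.index? noteNames note).map (fun n => (n : Int))

-- l[num]; only ever called with num ∈ [0, 12) by both programs, so getD's default is dead
def num2note (num : Int) : String := (PySem.List.pyGet? noteNames num).getD ""

-- s.ljust(2) (exact: pad on the right with spaces up to width 2)
def ljust2 (s : String) : String := s ++ String.ofList (List.replicate (2 - s.toList.length) ' ')

-- ===== PORT A =====
def tab_oct2str (tab : List String) : String :=
  let notenums : List (Option Int) :=
    tab.foldl (fun acc note => acc ++ [note2num note]) []
  (PySem.List.pyRange 0 12 1).foldl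
    (fun s i =>
      if (some i) ∈ notenums then s ++ (" " ++ ljust2 (num2note i) ++ " |")
      else s ++ "    |") ""

-- ===== PORT B =====
def stepB (cells : List String) (note : String) : List String :=
  match note2num note with
  | none => cells
  | some n => cells.set n.toNat (" " ++ ljust2 (num2note n) ++ " |")
  -- n comes from list.index so 0 ≤ n; .toNat is exact here

def tab_oct2str_alt (tab : List String) : String :=
  PySem.Str.join "" (tab.foldl stepB (List.replicate 12 "    |"))

-- ===== PRECONDITION & SPEC =====
def Spec_tab_oct2str (tab : List String) (out : String) : Prop := out = tab_oct2str_alt tab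
instance (tab : List String) (out : String) : Decidable (Spec_tab_oct2str tab out) := by unfold Spec_tab_oct2str; infer_instance

-- ===== CLAIM (what is proved, stated in full; the proofs are below) =====
def Claim_equal_tab_oct2str : Prop := ∀ (tab : List String), Dom_tab_oct2str tab → Spec_tab_oct2str tab (tab_oct2str tab)

-- ===== LEMMAS AND PROOFS =====

-- the filled cell for column i, and the cell chosen for column j given the note numbers
def cellF (i : Int) : String := " " ++ ljust2 (num2note i) ++ " |"

def cellAt (m : List (Option Int)) (j : Nat) : String :=
  if (some (j : Int)) ∈ m then cellF (j : Int) else "    |"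

lemma note2num_nonneg {s : String} {n : Int} (h : note2num s = some n) : 0 ≤ n := by
  unfold note2num at h
  cases hi : PySem.List.index? noteNames s with
  | none => rw [hi] at h; simp at h
  | some k => rw [hi] at h; simp at h; omega

-- A's first loop builds tab.map note2num
lemma notenums_eq (tab : List String) (acc : List (Option Int)) :
    tab.foldl (fun acc note => acc ++ [note2num note]) acc = acc ++ tab.map note2num := by
  induction tab generalizing acc with
  | nil => simp
  | cons x xs ih => simp [List.foldl_cons, ih]

lemma stepB_length (cells : List String) (note : String) :
    (stepB cells note).length = cells.length := by
  unfold stepB; split <;> simp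

lemma foldlB_length (tab : List String) (cells : List String) :
    (tab.foldl stepB cells).length = cells.length := by
  induction tab generalizing cells with
  | nil => rfl
  | cons x xs ih => simp [List.foldl_cons, ih, stepB_length]

-- scatter invariant: cell j of the final list
lemma foldlB_get? (tab : List String) (cells : List String) (j : Nat) (hj : j < cells.length) :
    (tab.foldl stepB cells)[j]? =
      if (some (j : Int)) ∈ tab.map note2num then some (cellF (j : Int)) else cells[j]? := by
  induction tab generalizing cells with
  | nil => simp
  | cons x xs ih =>
    rw [List.foldl_cons]
    have hj' : j < (stepB cells x).length := by rw [stepB_length]; exact hj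
    rw [ih (stepB cells x) hj']
    cases hx : note2num x with
    | none =>
      have hstep : stepB cells x = cells := by unfold stepB; rw [hx]
      rw [hstep]
      simp [hx]
    | some n =>
      have hn : 0 ≤ n := note2num_nonneg hx
      have hstep : stepB cells x = cells.set n.toNat (cellF n) := by
        unfold stepB; rw [hx]; rfl
      rw [hstep]
      by_cases hnj : n = (j : Int)
      · subst hnj
        have hmem : some ((j : Nat) : Int) ∈ (x :: xs).map note2num := by simp [hx]
        rw [if_pos hmem]
        have ht : ((j : Nat) : Int).toNat = j := Int.toNat_natCast j
        rw [ht]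
        by_cases hxs : some ((j : Nat) : Int) ∈ xs.map note2num
        · rw [if_pos hxs]
        · rw [if_neg hxs, List.getElem?_set_self hj]
      · have hne : n.toNat ≠ j := by omega
        have hset : (cells.set n.toNat (cellF n))[j]? = cells[j]? := by
          rw [List.getElem?_set]; simp [hne]
        rw [hset]
        have hh : ¬ (some (j : Int) = some n) := by simp; omega
        simp [hx, hh]

lemma foldlB_eq_map (tab : List String) :
    tab.foldl stepB (List.replicate 12 "    |") =
      (List.range 12).map (cellAt (tab.map note2num)) := by
  apply List.ext_getElem?
  intro j
  by_cases hj : j < 12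
  · have hj' : j < (List.replicate 12 ("    |" : String)).length := by simpa using hj
    rw [foldlB_get? tab _ j hj']
    have hR : ((List.range 12).map (cellAt (tab.map note2num)))[j]? =
        some (cellAt (tab.map note2num) j) := by
      simp [hj]
    have hL : (List.replicate 12 ("    |" : String))[j]? = some "    |" := by
      rw [List.getElem?_replicate, if_pos hj]
    rw [hR, hL]
    unfold cellAt
    by_cases hm : (some (j : Int)) ∈ tab.map note2num
    · rw [if_pos hm, if_pos hm]
    · rw [if_neg hm, if_neg hm]
  · have h1 : (tab.foldl stepB (List.replicate 12 "    |")).length ≤ j := by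
      rw [foldlB_length]; simpa using Nat.le_of_not_lt hj
    have h2 : ((List.range 12).map (cellAt (tab.map note2num))).length ≤ j := by
      simpa using Nat.le_of_not_lt hj
    rw [List.getElem?_eq_none h1, List.getElem?_eq_none h2]

-- push the branch of an if out of the append so the fold has shape s ++ g i
lemma foldl_if_push (l : List Int) (P : Int → Prop) [DecidablePred P]
    (u v : Int → String) (init : String) :
    l.foldl (fun s i => if P i then s ++ u i else s ++ v i) init =
      l.foldl (fun s i => s ++ (if P i then u i else v i)) init := by
  induction l generalizing init with
  | nil => rfl
  | cons x xs ih => by_cases h : P x <;> simp [List.foldl_cons, h, ih]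

-- ''.join with empty separator peels off the head
lemma join_nil_cons (a : List Char) (rest : List (List Char)) :
    PySem.Chars.join [] (a :: rest) = a ++ PySem.Chars.join [] rest := by
  cases rest with
  | nil => simp [PySem.Chars.join_singleton, PySem.Chars.join_nil]
  | cons b bs => rw [PySem.Chars.join_cons_cons]; simp

-- accumulating string fold = join of the mapped list
lemma foldl_append_join (l : List Int) (g : Int → String) (init : String) :
    l.foldl (fun s i => s ++ g i) init = init ++ PySem.Str.join "" (l.map g) := by
  induction l generalizing init with
  | nil =>
    apply String.ext
    simp [PySem.Chars.join_nil]
  | cons x xs ih =>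
    rw [List.foldl_cons, ih]
    apply String.ext
    simp [join_nil_cons]

lemma pyRange_12 : PySem.List.pyRange 0 12 1 = (List.range 12).map (fun j : Nat => (j : Int)) := by
  decide

-- ===== VERDICT (by name: the statement is the Claim_ definition above) =====
theorem tab_oct2str_spec : Claim_equal_tab_oct2str := by
  intro tab _
  show tab_oct2str tab = tab_oct2str_alt tab
  unfold tab_oct2str tab_oct2str_alt
  show (PySem.List.pyRange 0 12 1).foldl
      (fun s i =>
        if (some i) ∈ tab.foldl (fun acc note => acc ++ [note2num note]) [] then
          s ++ (" " ++ ljust2 (num2note i) ++ " |")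
        else s ++ "    |") ""
    = PySem.Str.join "" (tab.foldl stepB (List.replicate 12 "    |"))
  rw [notenums_eq, foldlB_eq_map, pyRange_12, List.nil_append]
  rw [foldl_if_push _ (fun i => (some i) ∈ tab.map note2num)
        (fun i => " " ++ ljust2 (num2note i) ++ " |") (fun _ => "    |") ""]
  rw [foldl_append_join]
  have hmap : ((List.range 12).map (fun j : Nat => (j : Int))).map
        (fun i => if (some i) ∈ tab.map note2num then " " ++ ljust2 (num2note i) ++ " |" else "    |")
      = (List.range 12).map (cellAt (tab.map note2num)) := by
    rw [List.map_map]
    apply List.map_congr_left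
    intro j _
    rfl
  rw [hmap]
  apply String.ext
  simp
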